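-- pv_equiv track=rewrite | github.com/hahoyeah/codingtest | 프로그래머스/lv1/12930. 이상한 문자 만들기/이상한 문자 만들기.py | solution
-- ===== SOURCE A (Python) =====
-- def solution(s):
--     a=[]
--     s=s.split(" ")
--     for i in range(len(s)):
--         for j in range(len(s[i])):
--             if j%2==0:
--                 a.append(s[i][j].upper())
--             else:
--                 a.append(s[i][j].lower())
--         a.append(" ")
--
--     c="".join(a[:-1])
--     return c
-- ===== SOURCE B (Python) =====
-- def solution(s):
--     out = []
--     k = 0
--     for ch in s:
--         if ch == ' ':
--             out.append(ch)
--             k = 0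
--         else:
--             out.append(ch.upper() if k % 2 == 0 else ch.lower())
--             k += 1
--     return "".join(out)
-- ===== Notes on version B (the rewrite author's own statement) =====
-- stated objective: simpler
-- what changed: Replaces split-into-words plus an index-based inner loop and trailing-space trimming by a single pass over the string with a counter that resets on each space.
import Mathlib
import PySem

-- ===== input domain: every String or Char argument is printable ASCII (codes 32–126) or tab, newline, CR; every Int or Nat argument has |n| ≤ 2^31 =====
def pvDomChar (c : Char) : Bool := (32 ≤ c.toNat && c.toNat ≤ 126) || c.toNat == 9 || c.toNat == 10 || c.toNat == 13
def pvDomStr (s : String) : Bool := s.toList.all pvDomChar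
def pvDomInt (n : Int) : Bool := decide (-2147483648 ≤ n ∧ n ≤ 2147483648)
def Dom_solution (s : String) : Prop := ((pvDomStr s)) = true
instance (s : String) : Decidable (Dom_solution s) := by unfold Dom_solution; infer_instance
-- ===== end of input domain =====

-- B replaces split-into-words + index-based inner loop + trailing-space trimming by one pass with a
-- counter that resets on spaces (objective: simpler).

-- ===== PORT A =====
-- literal port of A: split on " ", per word alternate .upper()/.lower() by the index's parity into a
-- list of 1-char strings, append " " after each word, join all but the last element ( a[:-1] ).
def solution (s : String) : String :=
  let parts := PySem.Chars.splitOn s.toList [' ']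
  let a : List (List Char) :=
    parts.foldl (fun a w =>
      ((PySem.List.enumerate w).foldl (fun a jc =>
        if PySem.Int.mod jc.1 2 == 0 then a ++ [[PySem.Chars.upperChar jc.2]]
        else a ++ [[PySem.Chars.lowerChar jc.2]]) a) ++ [[' ']]) []
  String.ofList (PySem.Chars.join [] (PySem.List.slice a none (some (-1))))

-- ===== PORT B =====
-- single pass, counter k resets to 0 on a space; builds the output list front to back.
def solutionAltGo : List Char → Nat → List Char
  | [], _ => []
  | c :: cs, k =>
    if c = ' ' then c :: solutionAltGo cs 0
    else (if k % 2 == 0 then PySem.Chars.upperChar c else PySem.Chars.lowerChar c)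
           :: solutionAltGo cs (k + 1)

def solution_alt (s : String) : String := String.ofList (solutionAltGo s.toList 0)

-- ===== PRECONDITION & SPEC =====
def Spec_solution (s : String) (out : String) : Prop := out = solution_alt s
instance (s : String) (out : String) : Decidable (Spec_solution s out) := by unfold Spec_solution; infer_instance

-- ===== CLAIM (what is proved, stated in full; the proofs are below) =====
def Claim_equal_solution : Prop := ∀ (s : String), Dom_solution s → Spec_solution s (solution s)

-- ===== LEMMAS AND PROOFS =====

-- transform one character at counter k
def pvTr (k : Nat) (c : Char) : Char :=
  if k % 2 == 0 then PySem.Chars.upperChar c else PySem.Chars.lowerChar c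

-- transform one word starting at counter k
def pvW (k : Nat) : List Char → List Char
  | [] => []
  | c :: cs => pvTr k c :: pvW (k + 1) cs

-- simple structural split on ' '
def pvSp : List Char → List (List Char)
  | [] => [[]]
  | c :: cs =>
    if c = ' ' then [] :: pvSp cs
    else match pvSp cs with
      | [] => [[c]]
      | w :: t => (c :: w) :: t

-- each word transformed (first word from counter k) and followed by one ' '
def pvP (k : Nat) : List (List Char) → List Char
  | [] => []
  | w :: t => pvW k w ++ ' ' :: pvP 0 t

-- words joined by single spaces, first word transformed from counter k
def pvJ (k : Nat) : List (List Char) → List Char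
  | [] => []
  | [w] => pvW k w
  | w :: t => pvW k w ++ ' ' :: pvJ 0 t

theorem pvSp_ne_nil (cs : List Char) : pvSp cs ≠ [] := by
  cases cs with
  | nil => simp [pvSp]
  | cons c cs =>
    simp only [pvSp]
    split
    · simp
    · split <;> simp

theorem pvGo_eq (fuel : Nat) (cs cur : List Char) (acc : List (List Char)) (h : cs.length ≤ fuel) :
    PySem.Chars.splitOn.go [' '] fuel cs cur acc =
      acc.reverse ++
        (match pvSp cs with
          | [] => [cur.reverse]
          | w :: t => (cur.reverse ++ w) :: t) := by
  induction fuel generalizing cs cur acc with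
  | zero =>
    have : cs = [] := List.length_eq_zero_iff.mp (Nat.le_zero.mp h)
    subst this
    show ((cur.reverse ++ []) :: acc).reverse = _
    simp [pvSp]
  | succ n ih =>
    cases cs with
    | nil =>
      show (cur.reverse :: acc).reverse = _
      simp [pvSp]
    | cons c rest =>
      obtain ⟨w, t, hw⟩ : ∃ w t, pvSp rest = w :: t := by
        cases hsp : pvSp rest with
        | nil => exact absurd hsp (pvSp_ne_nil rest)
        | cons w t => exact ⟨w, t, rfl⟩
      have hrest : rest.length ≤ n := by simpa using h
      rw [show PySem.Chars.splitOn.go [' '] (n + 1) (c :: rest) cur acc =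
            if [' '].isPrefixOf (c :: rest) then
              PySem.Chars.splitOn.go [' '] n (List.drop 1 (c :: rest)) [] (cur.reverse :: acc)
            else PySem.Chars.splitOn.go [' '] n rest (c :: cur) acc from rfl]
      by_cases hc : c = ' '
      · subst hc
        rw [if_pos (by simp [List.isPrefixOf])]
        rw [List.drop_one, List.tail_cons, ih rest [] (cur.reverse :: acc) hrest]
        have hsp : pvSp (' ' :: rest) = [] :: pvSp rest := by simp [pvSp]
        rw [hsp, hw]
        simp
      · rw [if_neg (by simp [List.isPrefixOf]; exact fun hh => hc hh.symm)]
        rw [ih rest (c :: cur) acc hrest]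
        have hsp : pvSp (c :: rest) = (c :: w) :: t := by simp [pvSp, hc, hw]
        rw [hsp, hw]
        simp

theorem pvSplitOn_eq (cs : List Char) : PySem.Chars.splitOn cs [' '] = pvSp cs := by
  show PySem.Chars.splitOn.go [' '] (cs.length + 1) cs [] [] = pvSp cs
  rw [pvGo_eq _ _ _ _ (by omega)]
  obtain ⟨w, t, hw⟩ : ∃ w t, pvSp cs = w :: t := by
    cases hsp : pvSp cs with
    | nil => exact absurd hsp (pvSp_ne_nil cs)
    | cons w t => exact ⟨w, t, rfl⟩
  rw [hw]
  simp

theorem pvInner (w : List Char) (k : Nat) (a : List (List Char)) :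
    (PySem.List.enumerate w (k : Int)).foldl (fun a jc =>
        if PySem.Int.mod jc.1 2 == 0 then a ++ [[PySem.Chars.upperChar jc.2]]
        else a ++ [[PySem.Chars.lowerChar jc.2]]) a
      = a ++ (pvW k w).map ([·]) := by
  induction w generalizing k a with
  | nil => simp [PySem.List.enumerate, pvW]
  | cons c cs ih =>
    simp only [PySem.List.enumerate, List.foldl_cons, pvW, pvTr]
    have hmod : PySem.Int.mod (k : Int) 2 = ((k % 2 : Nat) : Int) := by
      simp [PySem.Int.mod, Int.fmod_eq_emod]
    have hsucc : ((k : Int) + 1) = ((k + 1 : Nat) : Int) := by push_cast; ring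
    have hcond : (((k % 2 : Nat) : Int) == 0) = (k % 2 == 0) := by
      rcases Nat.mod_two_eq_zero_or_one k with h | h <;> simp [h]
    rw [hmod, hsucc, hcond, ih (k + 1)]
    split <;> simp

theorem pvOuter (parts : List (List Char)) (a : List (List Char)) :
    parts.foldl (fun a w =>
      ((PySem.List.enumerate w).foldl (fun a jc =>
        if PySem.Int.mod jc.1 2 == 0 then a ++ [[PySem.Chars.upperChar jc.2]]
        else a ++ [[PySem.Chars.lowerChar jc.2]]) a) ++ [[' ']]) a
      = a ++ (pvP 0 parts).map ([·]) := by
  have hin : ∀ (w : List Char) (a : List (List Char)),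
      (PySem.List.enumerate w).foldl (fun a jc =>
        if PySem.Int.mod jc.1 2 == 0 then a ++ [[PySem.Chars.upperChar jc.2]]
        else a ++ [[PySem.Chars.lowerChar jc.2]]) a = a ++ (pvW 0 w).map ([·]) := by
    intro w a
    have := pvInner w 0 a
    simpa using this
  induction parts generalizing a with
  | nil => simp [pvP]
  | cons w t ih =>
    simp only [List.foldl_cons, pvP]
    rw [hin, ih]
    simp

theorem pvP_ne_nil (k : Nat) (parts : List (List Char)) (h : parts ≠ []) : pvP k parts ≠ [] := by
  cases parts with
  | nil => exact absurd rfl h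
  | cons w t => simp [pvP]

theorem pvDropLast_P (k : Nat) (parts : List (List Char)) (h : parts ≠ []) :
    (pvP k parts).dropLast = pvJ k parts := by
  induction parts generalizing k with
  | nil => exact absurd rfl h
  | cons w t ih =>
    cases t with
    | nil => simp [pvP, pvJ]
    | cons w' t' =>
      have hne : pvP 0 (w' :: t') ≠ [] := pvP_ne_nil 0 _ (by simp)
      simp only [pvP, pvJ]
      rw [List.dropLast_append_of_ne_nil (by simp),
          show pvW 0 w' ++ ' ' :: pvP 0 t' = pvP 0 (w' :: t') from rfl,
          List.dropLast_cons_of_ne_nil hne, ih 0 (by simp)]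

theorem pvJ_sp (cs : List Char) (k : Nat) : pvJ k (pvSp cs) = solutionAltGo cs k := by
  induction cs generalizing k with
  | nil => simp [pvSp, pvJ, pvW, solutionAltGo]
  | cons c cs ih =>
    obtain ⟨w, t, hw⟩ : ∃ w t, pvSp cs = w :: t := by
      cases h : pvSp cs with
      | nil => exact absurd h (pvSp_ne_nil cs)
      | cons w t => exact ⟨w, t, rfl⟩
    by_cases hc : c = ' '
    · subst hc
      have hsp : pvSp (' ' :: cs) = [] :: pvSp cs := by simp [pvSp]
      rw [hsp, hw]
      simp only [pvJ, pvW, List.nil_append]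
      rw [← hw, ih]
      simp [solutionAltGo]
    · have key : pvJ k (pvSp (c :: cs)) = pvTr k c :: pvJ (k + 1) (pvSp cs) := by
        simp only [pvSp, if_neg hc, hw]
        cases t with
        | nil => simp [pvJ, pvW]
        | cons w' t' => simp [pvJ, pvW]
      rw [key, ih]
      simp [solutionAltGo, hc, pvTr]

-- ===== VERDICT (by name: the statement is the Claim_ definition above) =====
theorem solution_spec : Claim_equal_solution := by
  intro s _
  unfold Spec_solution solution solution_alt
  simp only [pvSplitOn_eq, pvOuter, List.nil_append]
  rw [PySem.List.slice_to_neg_one, ← List.map_dropLast,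
      pvDropLast_P 0 _ (pvSp_ne_nil _), PySem.Chars.join_nil_singletons, pvJ_sp]
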